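-- pv_equiv track=rewrite | github.com/all-day-and-night/algorithms | swea/load_balancing.py | sticky_sol
-- ===== SOURCE A (Python) =====
-- def sticky_sol(servers, requests):
--     answer = [[] for _ in range(servers)]
--     idx = 0
--     maps = {}
--     for request in requests:
--         if request in maps.keys():
--             answer[maps[request]].append(request)
--         else:
--             answer[idx].append(request)
--             maps[request] = idx
--             idx = (idx + 1) % servers
--
--     return answer
-- ===== SOURCE B (Python) =====
-- def sticky_sol(servers, requests):
--     # Pass 1: assign each distinct request a server index in first-appearance order.
--     mapping = {}
--     count = 0
--     for r in requests:
--         if r not in mapping: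
--             mapping[r] = count % servers
--             count += 1
--     # Pass 2: group the requests by their assigned server, preserving order.
--     answer = [[] for _ in range(servers)]
--     for r in requests:
--         answer[mapping[r]].append(r)
--     return answer
-- ===== Notes on version B (the rewrite author's own statement) =====
-- stated objective: alternative
-- what changed: A's single interleaved loop (append + assign + rotate index as it goes) is split into two passes: one pass builds the request->server index map by counting distinct requests, a second pass groups the requests by that map.
import Mathlib
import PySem

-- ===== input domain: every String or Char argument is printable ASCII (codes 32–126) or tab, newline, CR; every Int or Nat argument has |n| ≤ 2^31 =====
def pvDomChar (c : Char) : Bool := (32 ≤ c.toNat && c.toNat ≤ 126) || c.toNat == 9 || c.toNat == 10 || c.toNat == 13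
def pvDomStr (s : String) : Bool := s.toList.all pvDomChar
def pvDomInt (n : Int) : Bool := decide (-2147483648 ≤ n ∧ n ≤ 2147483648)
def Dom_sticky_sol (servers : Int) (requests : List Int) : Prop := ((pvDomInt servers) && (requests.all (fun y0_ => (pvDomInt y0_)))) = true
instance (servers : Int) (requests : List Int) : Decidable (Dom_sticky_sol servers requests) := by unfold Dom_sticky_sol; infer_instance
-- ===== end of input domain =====

-- B re-decomposes A's single interleaved loop into two passes (build the request→server map, then group);
-- same results, no speed claim.

-- ===== PORT A =====
-- `answer[i].append(x)`: in A (and B) the index is always a valid non-negative index when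
-- the Python returns, so `List.modify` at `i.toNat` is exact there.
def pvAppendAt (xs : List (List Int)) (i : Int) (x : Int) : List (List Int) :=
  xs.modify i.toNat (fun l => l ++ [x])

-- one iteration of A's loop over state (answer, idx, maps)
def stepA (servers : Int) (st : List (List Int) × Int × PySem.Dict Int Int) (request : Int) :
    List (List Int) × Int × PySem.Dict Int Int :=
  match st.2.2.get? request with
  | some j => (pvAppendAt st.1 j request, st.2.1, st.2.2)
  | none => (pvAppendAt st.1 st.2.1 request,
             PySem.Int.mod (st.2.1 + 1) servers,
             st.2.2.insert request st.2.1)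

def sticky_sol (servers : Int) (requests : List Int) : List (List Int) :=
  (requests.foldl (stepA servers) (List.replicate servers.toNat [], 0, PySem.Dict.empty)).1

-- ===== PORT B =====
-- pass 1 of B: one iteration building (mapping, count)
def stepB (servers : Int) (mc : PySem.Dict Int Int × Int) (r : Int) : PySem.Dict Int Int × Int :=
  if mc.1.contains r then mc else (mc.1.insert r (PySem.Int.mod mc.2 servers), mc.2 + 1)

def sticky_sol_alt (servers : Int) (requests : List Int) : List (List Int) :=
  let mapping := (requests.foldl (stepB servers) (PySem.Dict.empty, 0)).1
  -- pass 2: `mapping[r]` always hits (every request was inserted in pass 1), so getD is exact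
  requests.foldl (fun ans r => pvAppendAt ans (mapping.getD r 0) r)
    (List.replicate servers.toNat [])

-- ===== PRECONDITION & SPEC =====
-- A raises (IndexError on answer[0]; B: ZeroDivisionError) when servers ≤ 0 and requests is nonempty.
def Pre_sticky_sol (servers : Int) (requests : List Int) : Prop :=
  requests = [] ∨ 0 < servers
instance (servers : Int) (requests : List Int) : Decidable (Pre_sticky_sol servers requests) := by
  unfold Pre_sticky_sol; infer_instance
def pvWitness_sticky_sol : Int × List Int := (2, [1, 2, 1, 3])

def Spec_sticky_sol (servers : Int) (requests : List Int) (out : List (List Int)) : Prop := out = sticky_sol_alt servers requests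
instance (servers : Int) (requests : List Int) (out : List (List Int)) : Decidable (Spec_sticky_sol servers requests out) := by unfold Spec_sticky_sol; infer_instance

-- ===== CLAIM (what is proved, stated in full; the proofs are below) =====
def Claim_equal_sticky_sol : Prop := ∀ (servers : Int) (requests : List Int), Dom_sticky_sol servers requests → Pre_sticky_sol servers requests → Spec_sticky_sol servers requests (sticky_sol servers requests)

-- ===== LEMMAS AND PROOFS =====

-- stepB never overwrites an existing key
theorem bmap_get?_preserve (s : Int) (l : List Int) :
    ∀ (m : PySem.Dict Int Int) (c r v : Int), m.get? r = some v →
      ((l.foldl (stepB s) (m, c)).1).get? r = some v := by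
  induction l with
  | nil => intro m c r v h; simpa using h
  | cons x xs ih =>
    intro m c r v h
    simp only [List.foldl_cons, stepB]
    by_cases hx : m.contains x = true
    · simp only [hx, if_true]; exact ih m c r v h
    · simp only [hx, Bool.false_eq_true, if_false]
      apply ih
      have hrx : r ≠ x := by
        intro he; subst he
        rw [PySem.Dict.contains_eq_isSome_get?, h] at hx; simp at hx
      rw [PySem.Dict.get?_insert_of_ne _ _ hrx]; exact h

theorem mod_succ_mod (c s : Int) (hs : 0 < s) :
    PySem.Int.mod (PySem.Int.mod c s + 1) s = PySem.Int.mod (c + 1) s := by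
  rw [PySem.Int.mod_eq_emod_of_pos hs, PySem.Int.mod_eq_emod_of_pos hs,
      PySem.Int.mod_eq_emod_of_pos hs,
      Int.add_emod (c % s) 1 s, Int.emod_emod_of_dvd _ dvd_rfl, ← Int.add_emod]

-- main invariant: A's interleaved loop from a synchronized state equals B's fill pass
-- with the map B would build from that state.
theorem main_inv (s : Int) (hs : 0 < s) (l : List Int) :
    ∀ (ans : List (List Int)) (m : PySem.Dict Int Int) (c : Int),
      (l.foldl (stepA s) (ans, PySem.Int.mod c s, m)).1
        = l.foldl (fun a r => pvAppendAt a (((l.foldl (stepB s) (m, c)).1).getD r 0) r) ans := by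
  induction l with
  | nil => intro ans m c; rfl
  | cons x xs ih =>
    intro ans m c
    simp only [List.foldl_cons]
    cases h : m.get? x with
    | some j =>
      have hc : m.contains x = true := by
        rw [PySem.Dict.contains_eq_isSome_get?, h]; rfl
      have hM : ((xs.foldl (stepB s) (m, c)).1).getD x 0 = j := by
        rw [PySem.Dict.getD_eq_get?_getD, bmap_get?_preserve s xs m c x j h]; rfl
      simp only [stepA, h, stepB, hc, if_true, hM]
      exact ih (pvAppendAt ans j x) m c
    | none =>
      have hc : m.contains x = false := by
        rw [PySem.Dict.contains_eq_isSome_get?, h]; rfl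
      have hm' : (m.insert x (PySem.Int.mod c s)).get? x = some (PySem.Int.mod c s) :=
        PySem.Dict.get?_insert_self _ _ _
      have hM : ((xs.foldl (stepB s) (m.insert x (PySem.Int.mod c s), c + 1)).1).getD x 0
          = PySem.Int.mod c s := by
        rw [PySem.Dict.getD_eq_get?_getD, bmap_get?_preserve s xs _ (c + 1) x _ hm']; rfl
      simp only [stepA, h, stepB, hc, Bool.false_eq_true, if_false, hM, mod_succ_mod c s hs]
      exact ih (pvAppendAt ans (PySem.Int.mod c s) x) (m.insert x (PySem.Int.mod c s)) (c + 1)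

-- ===== VERDICT (by name: the statement is the Claim_ definition above) =====
theorem sticky_sol_spec : Claim_equal_sticky_sol := by
  intro servers requests _ hpre
  unfold Spec_sticky_sol sticky_sol sticky_sol_alt
  rcases hpre with h | hs
  · subst h; rfl
  · have h0 : (0 : Int) = PySem.Int.mod 0 servers := by
      rw [PySem.Int.mod_eq_emod_of_pos hs]; simp
    rw [h0]
    exact main_inv servers hs requests (List.replicate servers.toNat []) PySem.Dict.empty 0
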